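-- pv_equiv track=rewrite | github.com/tanishqtyagii/SR-Wireless-CAN | latest/testing.py | erase_plan_0x0C_frames
-- ===== SOURCE A (Python) =====
-- def erase_plan_0x0C_frames(erase_start: int, length_to_clear: int,
--                            chunk: int = 0x10000) -> list[list[int]]:
--     """
--     Builds 0x0C erase frames of the form:
--       [0x0C, session, addr32_be(4 bytes), (len-1)_be(2 bytes)]
--     Split into chunk-sized erases (default 0x10000), final chunk is remainder.
--     """
--     if length_to_clear <= 0:
--         return []
--
--     frames: list[list[int]] = []
--     addr = erase_start
--     remaining = length_to_clear
--
--     while remaining > 0: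
--         this_len = min(remaining, chunk)
--         len_m1 = this_len - 1  # protocol expects (len-1)
--
--         frames.append([
--             0x0C, 0x01,
--             (addr >> 24) & 0xFF, (addr >> 16) & 0xFF, (addr >> 8) & 0xFF, addr & 0xFF,
--             (len_m1 >> 8) & 0xFF, len_m1 & 0xFF,  # big-endian
--         ])
--
--         addr += this_len
--         remaining -= this_len
--
--     return frames
-- ===== SOURCE B (Python) =====
-- def _frame(addr: int, this_len: int) -> list[int]:
--     m = this_len - 1
--     return [
--         0x0C, 0x01,
--         (addr >> 24) & 0xFF, (addr >> 16) & 0xFF, (addr >> 8) & 0xFF, addr & 0xFF,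
--         (m >> 8) & 0xFF, m & 0xFF,
--     ]
--
-- def erase_plan_0x0C_frames(erase_start: int, length_to_clear: int,
--                            chunk: int = 0x10000) -> list[list[int]]:
--     if length_to_clear <= 0:
--         return []
--     full, rem = divmod(length_to_clear, chunk)
--     count = full + (1 if rem != 0 else 0)
--     return [_frame(erase_start + i * chunk, chunk if i < full else rem)
--             for i in range(count)]
-- ===== Notes on version B (the rewrite author's own statement) =====
-- stated objective: alternative
-- what changed: Replaces A's while-loop with running addr/remaining state by a closed-form plan: divmod gives the number of full chunks and the remainder, and each frame's start address and length are computed directly from the loop index.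
import Mathlib
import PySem

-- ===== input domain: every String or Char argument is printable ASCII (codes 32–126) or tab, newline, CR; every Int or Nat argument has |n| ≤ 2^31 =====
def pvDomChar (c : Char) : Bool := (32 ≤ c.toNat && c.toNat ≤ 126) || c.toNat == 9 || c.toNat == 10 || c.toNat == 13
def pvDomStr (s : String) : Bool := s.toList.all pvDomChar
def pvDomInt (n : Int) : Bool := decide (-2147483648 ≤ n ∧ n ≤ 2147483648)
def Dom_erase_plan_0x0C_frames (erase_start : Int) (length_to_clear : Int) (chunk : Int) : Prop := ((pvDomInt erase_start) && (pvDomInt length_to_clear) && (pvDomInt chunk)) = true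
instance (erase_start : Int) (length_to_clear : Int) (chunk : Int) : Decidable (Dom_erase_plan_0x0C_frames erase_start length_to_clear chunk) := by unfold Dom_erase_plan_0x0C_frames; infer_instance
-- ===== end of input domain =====

-- B replaces A's running addr/remaining while-loop by a divmod-based closed-form plan (same output; alternative decomposition, no speed claim).

-- ===== PORT A =====
-- A's while-loop; fuel = length_to_clear.toNat suffices because each iteration
-- consumes min(remaining, chunk) ≥ 1 of remaining whenever chunk ≥ 1 (Pre_).
def eraseLoopA (chunk : Int) : Nat → Int → Int → List (List Int) → List (List Int)
  | 0, _, _, frames => frames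
  | fuel + 1, addr, remaining, frames =>
    if remaining > 0 then
      let this_len := min remaining chunk
      let len_m1 := this_len - 1
      eraseLoopA chunk fuel (addr + this_len) (remaining - this_len)
        (frames ++ [[12, 1,
          PySem.Int.mod (PySem.Int.floordiv addr 16777216) 256,
          PySem.Int.mod (PySem.Int.floordiv addr 65536) 256,
          PySem.Int.mod (PySem.Int.floordiv addr 256) 256,
          PySem.Int.mod addr 256,
          PySem.Int.mod (PySem.Int.floordiv len_m1 256) 256,
          PySem.Int.mod len_m1 256]])
    else frames

def erase_plan_0x0C_frames (erase_start : Int) (length_to_clear : Int) (chunk : Int) : List (List Int) :=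
  if length_to_clear ≤ 0 then []
  else eraseLoopA chunk length_to_clear.toNat erase_start length_to_clear []

-- ===== PORT B =====
def pvFrameB (addr : Int) (this_len : Int) : List Int :=
  [12, 1,
    PySem.Int.mod (PySem.Int.floordiv addr 16777216) 256,
    PySem.Int.mod (PySem.Int.floordiv addr 65536) 256,
    PySem.Int.mod (PySem.Int.floordiv addr 256) 256,
    PySem.Int.mod addr 256,
    PySem.Int.mod (PySem.Int.floordiv (this_len - 1) 256) 256,
    PySem.Int.mod (this_len - 1) 256]

def erase_plan_0x0C_frames_alt (erase_start : Int) (length_to_clear : Int) (chunk : Int) : List (List Int) :=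
  if length_to_clear ≤ 0 then []
  else
    (PySem.List.pyRange 0 (PySem.Int.floordiv length_to_clear chunk + (if PySem.Int.mod length_to_clear chunk ≠ 0 then 1 else 0)) 1).map
      (fun i => pvFrameB (erase_start + i * chunk)
        (if i < PySem.Int.floordiv length_to_clear chunk then chunk else PySem.Int.mod length_to_clear chunk))
-- ===== PRECONDITION & SPEC =====
-- Pre_ excludes only chunk ≤ 0 with length_to_clear > 0: there A's while-loop never
-- terminates (it never returns), so nothing is claimed on those inputs.
def Pre_erase_plan_0x0C_frames (erase_start : Int) (length_to_clear : Int) (chunk : Int) : Prop :=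
  1 ≤ chunk ∨ length_to_clear ≤ 0
instance (erase_start : Int) (length_to_clear : Int) (chunk : Int) : Decidable (Pre_erase_plan_0x0C_frames erase_start length_to_clear chunk) := by unfold Pre_erase_plan_0x0C_frames; infer_instance

def pvWitness_erase_plan_0x0C_frames : Int × Int × Int := (4096, 5, 2)

def Spec_erase_plan_0x0C_frames (erase_start : Int) (length_to_clear : Int) (chunk : Int) (out : List (List Int)) : Prop := out = erase_plan_0x0C_frames_alt erase_start length_to_clear chunk
instance (erase_start : Int) (length_to_clear : Int) (chunk : Int) (out : List (List Int)) : Decidable (Spec_erase_plan_0x0C_frames erase_start length_to_clear chunk out) := by unfold Spec_erase_plan_0x0C_frames; infer_instance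

-- ===== CLAIM (what is proved, stated in full; the proofs are below) =====
def Claim_equal_erase_plan_0x0C_frames : Prop := ∀ (erase_start : Int) (length_to_clear : Int) (chunk : Int), Dom_erase_plan_0x0C_frames erase_start length_to_clear chunk → Pre_erase_plan_0x0C_frames erase_start length_to_clear chunk → Spec_erase_plan_0x0C_frames erase_start length_to_clear chunk (erase_plan_0x0C_frames erase_start length_to_clear chunk)

-- ===== LEMMAS AND PROOFS =====

theorem eraseLoopA_zero (c : Int) (fuel : Nat) (a r : Int) (fr : List (List Int))
    (hr : r ≤ 0) : eraseLoopA c fuel a r fr = fr := by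
  cases fuel with
  | zero => rfl
  | succ n => simp [eraseLoopA, show ¬ r > 0 by omega]

-- The frame A's loop body appends is B's frame helper.
theorem frameA_eq (addr len_m1 : Int) :
    [(12:Int), 1,
      PySem.Int.mod (PySem.Int.floordiv addr 16777216) 256,
      PySem.Int.mod (PySem.Int.floordiv addr 65536) 256,
      PySem.Int.mod (PySem.Int.floordiv addr 256) 256,
      PySem.Int.mod addr 256,
      PySem.Int.mod (PySem.Int.floordiv len_m1 256) 256,
      PySem.Int.mod len_m1 256] = pvFrameB addr (len_m1 + 1) := by
  simp [pvFrameB]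

-- B's closed-form plan for the final chunk: 0 < r ≤ c gives exactly one frame.
theorem alt_single (es r c : Int) (hc : 1 ≤ c) (h0 : 0 < r) (hrc : r ≤ c) :
    erase_plan_0x0C_frames_alt es r c = [pvFrameB es r] := by
  have hc0 : (0:Int) < c := by omega
  unfold erase_plan_0x0C_frames_alt
  rw [if_neg (by omega)]
  rw [PySem.Int.floordiv_eq_ediv_of_pos hc0, PySem.Int.mod_eq_emod_of_pos hc0]
  rcases eq_or_lt_of_le hrc with heq | hlt
  · subst heq
    rw [Int.ediv_self (by omega), Int.emod_self]
    rw [if_neg (by omega)]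
    rw [show (1:Int) + 0 = 0 + 1 by ring, PySem.List.pyRange_one_singleton]
    simp
  · rw [Int.ediv_eq_zero_of_lt (by omega) hlt, Int.emod_eq_of_lt (by omega) hlt]
    rw [if_pos (by omega)]
    rw [show (0:Int) + 1 = 0 + 1 by ring, PySem.List.pyRange_one_singleton]
    simp

-- B's closed-form plan satisfies A's loop recurrence when r > c.
theorem alt_step (es r c : Int) (hc : 1 ≤ c) (hrc : c < r) :
    erase_plan_0x0C_frames_alt es r c =
      pvFrameB es c :: erase_plan_0x0C_frames_alt (es + c) (r - c) c := by
  have hc0 : (0:Int) < c := by omega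
  unfold erase_plan_0x0C_frames_alt
  rw [if_neg (show ¬ r ≤ 0 by omega), if_neg (show ¬ r - c ≤ 0 by omega)]
  rw [PySem.Int.floordiv_eq_ediv_of_pos hc0, PySem.Int.mod_eq_emod_of_pos hc0,
      PySem.Int.floordiv_eq_ediv_of_pos hc0, PySem.Int.mod_eq_emod_of_pos hc0]
  have hdiv : (r - c) / c = r / c - 1 := by
    have h := Int.add_mul_ediv_right r (-1) (show c ≠ 0 by omega)
    rw [show r + -1 * c = r - c by ring] at h
    omega
  have hmod : (r - c) % c = r % c := by
    rw [Int.sub_emod, Int.emod_self, sub_zero, Int.emod_emod_of_dvd _ dvd_rfl]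
  rw [hdiv, hmod]
  have hfull1 : 1 ≤ r / c := (Int.le_ediv_iff_mul_le hc0).mpr (by omega)
  have hcount : (0:Int) < r / c + (if r % c ≠ 0 then 1 else 0) := by
    split <;> omega
  rw [PySem.List.pyRange_one_cons hcount, List.map_cons]
  congr 1
  · rw [if_pos (by omega)]
    simp
  · rw [show r / c + (if r % c ≠ 0 then (1:Int) else 0) =
        1 + (r / c - 1 + (if r % c ≠ 0 then 1 else 0)) by ring,
      PySem.List.pyRange_one, PySem.List.pyRange_one]
    simp only [List.map_map, sub_zero]
    rw [show (1:Int) + (r / c - 1 + (if r % c ≠ 0 then 1 else 0)) - (0 + 1) =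
        r / c - 1 + (if r % c ≠ 0 then 1 else 0) by ring]
    apply List.map_congr_left
    intro k _
    simp only [Function.comp, zero_add]
    have haddr : es + (1 + (k:Int)) * c = es + c + (k:Int) * c := by ring
    by_cases hk : (1:Int) + k < r / c
    · rw [if_pos hk, if_pos (by omega), haddr]
    · rw [if_neg hk, if_neg (by omega), haddr]

theorem loopA_eq (c : Int) (hc : 1 ≤ c) :
    ∀ (fuel : Nat) (a r : Int) (fr : List (List Int)), 0 < r → r.toNat ≤ fuel →
      eraseLoopA c fuel a r fr = fr ++ erase_plan_0x0C_frames_alt a r c := by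
  intro fuel
  induction fuel with
  | zero => intro a r fr h0 hf; omega
  | succ n ih =>
    intro a r fr h0 hf
    simp only [eraseLoopA, if_pos h0]
    by_cases hrc : r ≤ c
    · have hmin : min r c = r := by omega
      rw [hmin, eraseLoopA_zero _ _ _ _ _ (by omega), alt_single a r c hc h0 hrc,
          frameA_eq a (r - 1), show r - 1 + 1 = r by ring]
    · have hmin : min r c = c := by omega
      rw [hmin, ih (a + c) (r - c) _ (by omega) (by omega),
          alt_step a r c hc (by omega), frameA_eq a (c - 1), show c - 1 + 1 = c by ring]
      simp

-- ===== VERDICT (by name: the statement is the Claim_ definition above) =====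
theorem erase_plan_0x0C_frames_spec : Claim_equal_erase_plan_0x0C_frames := by
  intro es l c _ hPre
  unfold Spec_erase_plan_0x0C_frames
  by_cases hl : l ≤ 0
  · unfold erase_plan_0x0C_frames erase_plan_0x0C_frames_alt
    rw [if_pos hl, if_pos hl]
  · have hc : 1 ≤ c := by
      rcases hPre with h | h
      · exact h
      · omega
    unfold erase_plan_0x0C_frames
    rw [if_neg hl, loopA_eq c hc l.toNat es l [] (by omega) le_rfl]
    simp
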